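-- pv_equiv track=rewrite | github.com/alis-khadka/llm_program_grader | dataset/solutions/20_21-3-2-python/AVCIKRRG.py | calc
-- ===== SOURCE A (Python) =====
-- def bfs(graph, node, mList):
--     if len(graph[node]) == 0:
--         return 1
--     if mList[node] != -1:
--         return mList[node]
--     nList = [0]
--     for child in graph[node]:
--         nList.append(bfs(graph, child, mList) + 1)
--     mList[node] = max(nList)
--     return max(nList)
--
-- def calc(N, A):
--     graph = [[] for _ in range(N + 1)]
--     memo = [-1] * (N + 1)
--     graph[0] = [x for x in range(1, N + 1)]
--     for edge in A:
--         start, end = edge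
--         graph[start].append(end)
--     return bfs(graph, 0, memo) - 2
-- ===== SOURCE B (Python) =====
-- def calc(N, A):
--     graph = [[] for _ in range(N + 1)]
--     graph[0] = list(range(1, N + 1))
--     for start, end in A:
--         graph[start].append(end)
--     dp = [0] * (N + 1)
--     for _ in range(N + 2):
--         new = [1 if not graph[v] else 1 + max(dp[c] for c in graph[v])
--                for v in range(N + 1)]
--         if new == dp:
--             break
--         dp = new
--     return dp[0] - 2
-- ===== Notes on version B (the rewrite author's own statement) =====
-- stated objective: alternative
-- what changed: Replaces the recursive memoized DFS with an iterative bottom-up fixpoint DP: a height vector is synchronously re-evaluated (at most N+2 rounds, stopping when it stops changing) and dp[0]-2 is returned.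
import Mathlib
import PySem

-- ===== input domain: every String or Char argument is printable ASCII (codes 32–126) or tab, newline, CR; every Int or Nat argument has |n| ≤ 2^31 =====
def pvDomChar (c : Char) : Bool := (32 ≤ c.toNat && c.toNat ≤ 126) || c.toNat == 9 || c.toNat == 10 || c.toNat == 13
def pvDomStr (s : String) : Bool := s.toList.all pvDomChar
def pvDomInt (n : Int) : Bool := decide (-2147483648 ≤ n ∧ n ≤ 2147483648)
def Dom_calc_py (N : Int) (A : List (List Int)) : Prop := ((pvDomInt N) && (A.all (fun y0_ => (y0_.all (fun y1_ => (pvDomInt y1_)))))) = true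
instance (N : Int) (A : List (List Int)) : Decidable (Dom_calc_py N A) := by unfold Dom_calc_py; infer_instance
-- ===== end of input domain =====

-- B replaces A's recursive memoized DFS by an iterative synchronous fixpoint DP over a height
-- vector (alternative algorithm, same return value); neither version observably mutates its arguments.

-- graph construction shared by both Pythons verbatim:
-- graph = [[] for _ in range(N+1)]; graph[0] = 1..N; graph[start].append(end) for each edge
def pvAddEdge (g : List (List Int)) (e : List Int) : List (List Int) :=
  match e with
  | [s, t] => PySem.List.pySetD g s (((PySem.List.pyGet? g s).getD []) ++ [t])
  | _ => g

def pvBuildGraph (N : Int) (A : List (List Int)) : List (List Int) :=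
  let g0 : List (List Int) := List.replicate (N + 1).toNat []
  let g1 := PySem.List.pySetD g0 0 (PySem.List.pyRange 1 (N + 1) 1)
  A.foldl pvAddEdge g1

-- graph[v] (in-range under Pre_)
def pvChilds (g : List (List Int)) (v : Int) : List Int := (PySem.List.pyGet? g v).getD []

-- ===== PORT A =====
-- recursive memoized DFS; fuel is a port artifact (recursion depth ≤ graph size on Pre_ inputs)
def pvBfs (g : List (List Int)) : Nat → Int → List Int → Int × List Int
  | 0, _, m => (0, m)
  | f + 1, v, m =>
    let cs := pvChilds g v
    if cs.length = 0 then (1, m)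
    else if (PySem.List.pyGet? m v).getD (-1) ≠ -1 then ((PySem.List.pyGet? m v).getD (-1), m)
    else
      -- nList = [0]; for child in cs: nList.append(bfs(child)+1); running max = max(nList)
      let r := cs.foldl (fun (acc : Int × List Int) c =>
          let p := pvBfs g f c acc.2
          (max acc.1 (p.1 + 1), p.2)) (0, m)
      (r.1, PySem.List.pySetD r.2 v r.1)

def calc_py (N : Int) (A : List (List Int)) : Int :=
  let graph := pvBuildGraph N A
  let memo : List Int := List.replicate (N + 1).toNat (-1)
  (pvBfs graph (graph.length + 1) 0 memo).1 - 2

-- ===== PORT B =====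
-- one synchronous re-evaluation round of the height vector
def pvStep (g : List (List Int)) (N : Int) (dp : List Int) : List Int :=
  (PySem.List.pyRange 0 (N + 1) 1).map (fun v =>
    let cs := pvChilds g v
    if cs.isEmpty then (1 : Int)
    else 1 + (PySem.List.max? (cs.map (fun c => (PySem.List.pyGet? dp c).getD 0)) (fun y => y)).getD 0)

-- for _ in range(N+2): new = round(dp); if new == dp: break; dp = new
def pvIter (g : List (List Int)) (N : Int) : Nat → List Int → List Int
  | 0, dp => dp
  | k + 1, dp =>
    let new := pvStep g N dp
    if new = dp then dp else pvIter g N k new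

def calc_py_alt (N : Int) (A : List (List Int)) : Int :=
  let graph := pvBuildGraph N A
  let dp0 : List Int := List.replicate (N + 1).toNat 0
  let dp := pvIter graph N (N + 2).toNat dp0
  (PySem.List.pyGet? dp 0).getD 0 - 2

-- ===== PRECONDITION & SPEC =====
-- Python's index v into a list of length n denotes slot pvNorm n v (negative = from the end)
def pvNorm (n : Int) (v : Int) : Int := if v < 0 then v + n else v

-- normalized successors of node v along the edges of A only
def pvEChilds (N : Int) (A : List (List Int)) (v : Int) : List Int :=
  A.filterMap (fun e => match e with
    | [s, t] => if pvNorm (N + 1) s = v then some (pvNorm (N + 1) t) else none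
    | _ => none)

-- one step of reachability closure along A's edges, and its fixpoint after |A|+1 steps
def pvENxt (N : Int) (A : List (List Int)) (S : Finset ℤ) : Finset ℤ :=
  S ∪ S.biUnion (fun v => (pvEChilds N A v).toFinset)
def pvEReach (N : Int) (A : List (List Int)) (v : Int) : Finset ℤ :=
  (pvENxt N A)^[A.length + 1] (pvEChilds N A v).toFinset

-- Pre_ excludes exactly the inputs on which A does not return: N < 0, malformed or
-- out-of-range edges (IndexError/ValueError), edges into node 0 and cyclic edge sets
-- (bfs recurses forever). Indices in [-(N+1), -1] are Python wraparound for node N+1+i.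
def Pre_calc_py (N : Int) (A : List (List Int)) : Prop :=
  0 ≤ N ∧
  (∀ e ∈ A, e.length = 2 ∧ (∀ x ∈ e, -(N + 1) ≤ x ∧ x ≤ N) ∧
    (∀ x ∈ e.tail, pvNorm (N + 1) x ≠ 0)) ∧
  (∀ v ∈ A.flatten, 1 ≤ pvNorm (N + 1) v →
    pvNorm (N + 1) v ∉ pvEReach N A (pvNorm (N + 1) v))

instance (N : Int) (A : List (List Int)) : Decidable (Pre_calc_py N A) := by
  unfold Pre_calc_py; infer_instance

def pvWitness_calc_py : Int × List (List Int) := (2, [[1, 2]])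

def Spec_calc_py (N : Int) (A : List (List Int)) (out : Int) : Prop := out = calc_py_alt N A
instance (N : Int) (A : List (List Int)) (out : Int) : Decidable (Spec_calc_py N A out) := by unfold Spec_calc_py; infer_instance

-- ===== CLAIM (what is proved, stated in full; the proofs are below) =====
def Claim_equal_calc_py : Prop := ∀ (N : Int) (A : List (List Int)), Dom_calc_py N A → Pre_calc_py N A → Spec_calc_py N A (calc_py N A)

-- ===== LEMMAS AND PROOFS =====

-- Python indexing through pvNorm ----------------------------------------------

lemma pvIdx_norm (n : Nat) (i : Int) (h1 : -(n : Int) ≤ i) (h2 : i < n) :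
    PySem.List.pyIdx? n i = some (pvNorm n i).toNat := by
  simp only [PySem.List.pyIdx?, pvNorm]
  split_ifs with h3 h4 h5
  all_goals try omega
  all_goals congr 1
  all_goals omega

lemma pvGet_norm {α : Type} (xs : List α) (i : Int) (h1 : -(xs.length : Int) ≤ i)
    (h2 : i < xs.length) : PySem.List.pyGet? xs i = xs[(pvNorm xs.length i).toNat]? := by
  simp [PySem.List.pyGet?, pvIdx_norm xs.length i h1 h2]

lemma pvSetD_norm {α : Type} (xs : List α) (i : Int) (v : α) (h1 : -(xs.length : Int) ≤ i)
    (h2 : i < xs.length) :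
    PySem.List.pySetD xs i v = xs.set (pvNorm xs.length i).toNat v := by
  simp [PySem.List.pySetD, PySem.List.pySet?, pvIdx_norm xs.length i h1 h2]

lemma pvGet_map {α β : Type} (f : α → β) (xs : List α) (i : Int) :
    PySem.List.pyGet? (xs.map f) i = (PySem.List.pyGet? xs i).map f := by
  simp only [PySem.List.pyGet?, List.length_map]
  cases PySem.List.pyIdx? xs.length i with
  | none => rfl
  | some k => simp

-- the synchronous height: value of node v after f rounds of bottom-up re-evaluation
def pvH (g : List (List Int)) : Nat → Int → Int
  | 0, _ => 0
  | f + 1, v =>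
    let cs := pvChilds g v
    if cs.isEmpty then 1 else cs.foldl (fun a c => max a (pvH g f c + 1)) 0

-- the (stabilized) height of node v of the normalized graph
def pvHt (g : List (List Int)) (N : Int) (v : Int) : Int := pvH g ((N + 1).toNat + 1) v

lemma pvH_nonneg (g : List (List Int)) (f : Nat) (v : Int) : 0 ≤ pvH g f v := by
  cases f with
  | zero => simp [pvH]
  | succ f =>
    simp only [pvH]
    split
    · norm_num
    · exact le_trans le_rfl (PySem.List.le_foldl_max_int (pvChilds g v) (fun c => pvH g f c + 1) 0).1

-- shape of the built graph ----------------------------------------------------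

lemma pvAddEdge_length (g : List (List Int)) (e : List Int) :
    (pvAddEdge g e).length = g.length := by
  unfold pvAddEdge
  split
  · exact PySem.List.length_pySetD _ _ _
  · rfl

lemma pvFoldAdd_length (l : List (List Int)) (g : List (List Int)) :
    (l.foldl pvAddEdge g).length = g.length := by
  induction l generalizing g with
  | nil => rfl
  | cons e t ih => simpa [List.foldl_cons, pvAddEdge_length] using ih (pvAddEdge g e)

lemma pvBuild_length (N : Int) (A : List (List Int)) :
    (pvBuildGraph N A).length = (N + 1).toNat := by
  unfold pvBuildGraph
  simp [pvFoldAdd_length, PySem.List.length_pySetD]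

lemma pvChilds_norm (g : List (List Int)) (N : Int) (hg : g.length = (N + 1).toNat)
    (hN : 0 ≤ N) (v : Int) (h1 : -(N + 1) ≤ v) (h2 : v ≤ N) :
    pvChilds g v = pvChilds g (pvNorm (N + 1) v) := by
  have hlen : (g.length : Int) = N + 1 := by rw [hg]; omega
  have hnv : pvNorm (N + 1) v = pvNorm (g.length : Int) v := by rw [hlen]
  have hn0 : 0 ≤ pvNorm (N + 1) v := by simp only [pvNorm]; split_ifs <;> omega
  unfold pvChilds
  rw [pvGet_norm g v (by omega) (by omega), PySem.List.pyGet?_of_nonneg _ hn0, hnv]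

-- raw selector: the child appended to slot w by edge e
def pvRawSel (N : Int) (w : Int) (e : List Int) : Option Int :=
  match e with
  | [s, t] => if pvNorm (N + 1) s = w then some t else none
  | _ => none

lemma pvBuild_childs (N : Int) (A : List (List Int)) (hN : 0 ≤ N)
    (hA : ∀ e ∈ A, e.length = 2 ∧ (∀ x ∈ e, -(N + 1) ≤ x ∧ x ≤ N) ∧
      (∀ x ∈ e.tail, pvNorm (N + 1) x ≠ 0)) :
    ∀ w, 0 ≤ w → w ≤ N → pvChilds (pvBuildGraph N A) w =
      (if w = 0 then PySem.List.pyRange 1 (N + 1) 1 else []) ++ A.filterMap (pvRawSel N w) := by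
  have hbase : ∀ w, 0 ≤ w → w ≤ N →
      pvChilds (PySem.List.pySetD (List.replicate (N + 1).toNat ([] : List Int)) 0
        (PySem.List.pyRange 1 (N + 1) 1)) w =
      (if w = 0 then PySem.List.pyRange 1 (N + 1) 1 else []) := by
    intro w hw0 hwN
    rw [pvSetD_norm _ _ _ (by simp; try omega) (by simp; try omega)]
    unfold pvChilds
    rw [PySem.List.pyGet?_of_nonneg _ hw0, List.getElem?_set]
    have h0 : (pvNorm (((List.replicate (N + 1).toNat ([] : List Int)).length : Int)) 0).toNat
        = 0 := by simp [pvNorm]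
    rw [h0]
    by_cases hw : w = 0
    · subst hw
      rw [if_pos (by simp), if_pos (by simp; omega)]
      rfl
    · rw [if_neg (by omega), if_neg hw, List.getElem?_replicate, if_pos (by omega)]
      rfl
  have haux : ∀ (l : List (List Int)) (g : List (List Int)), g.length = (N + 1).toNat →
      (∀ e ∈ l, e.length = 2 ∧ (∀ x ∈ e, -(N + 1) ≤ x ∧ x ≤ N) ∧
        (∀ x ∈ e.tail, pvNorm (N + 1) x ≠ 0)) →
      ∀ w, 0 ≤ w → w ≤ N →
      pvChilds (l.foldl pvAddEdge g) w = pvChilds g w ++ l.filterMap (pvRawSel N w) := by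
    intro l
    induction l with
    | nil => intro g _ _ w _ _; simp
    | cons e t ih =>
      intro g hg hwf w hw0 hwN
      have hwfe := hwf e List.mem_cons_self
      rcases e with _ | ⟨s, _ | ⟨t', _ | ⟨u, r⟩⟩⟩ <;> simp at hwfe
      obtain ⟨⟨⟨hs1, hs2⟩, ht1, ht2⟩, hto⟩ := hwfe
      simp only [List.foldl_cons]
      have hcast : (g.length : Int) = N + 1 := by rw [hg]; omega
      have hstep : pvAddEdge g [s, t'] =
          g.set (pvNorm (N + 1) s).toNat (pvChilds g s ++ [t']) := by
        simp only [pvAddEdge, pvChilds]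
        rw [pvSetD_norm _ _ _ (by rw [hcast]; omega) (by rw [hcast]; omega), hcast]
      rw [hstep, ih _ (by simp [hg]) (fun e' he' => hwf e' (List.mem_cons_of_mem _ he')) w hw0 hwN]
      have hns : 0 ≤ pvNorm (N + 1) s ∧ pvNorm (N + 1) s ≤ N := by
        simp only [pvNorm]; split_ifs <;> omega
      have hcs : pvChilds g s = pvChilds g (pvNorm (N + 1) s) :=
        pvChilds_norm g N hg hN s (by omega) (by omega)
      have hchild : pvChilds (g.set (pvNorm (N + 1) s).toNat (pvChilds g s ++ [t'])) w =
          pvChilds g w ++ (pvRawSel N w [s, t']).toList := by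
        unfold pvChilds
        rw [PySem.List.pyGet?_of_nonneg _ hw0, List.getElem?_set]
        by_cases hsw : pvNorm (N + 1) s = w
        · rw [if_pos (by omega), if_pos (by rw [hg]; omega)]
          have h2 : (PySem.List.pyGet? g s).getD [] = g[w.toNat]?.getD [] := by
            have h3 := hcs
            rw [hsw] at h3
            simpa [pvChilds, PySem.List.pyGet?_of_nonneg _ hw0] using h3
          rw [h2]
          simp [pvRawSel, hsw, PySem.List.pyGet?_of_nonneg _ hw0]
        · rw [if_neg (by omega)]
          simp [pvRawSel, hsw, PySem.List.pyGet?_of_nonneg _ hw0]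
      rw [hchild]
      simp [pvRawSel, List.filterMap_cons, List.append_assoc]
      split <;> simp
  intro w hw0 hwN
  unfold pvBuildGraph
  rw [haux A _ (by simp [PySem.List.length_pySetD]) hA w hw0 hwN, hbase w hw0 hwN]

-- raw children are in wraparound range
lemma pvRaw_childs_range (N : Int) (A : List (List Int)) (hN : 0 ≤ N)
    (hA : ∀ e ∈ A, e.length = 2 ∧ (∀ x ∈ e, -(N + 1) ≤ x ∧ x ≤ N) ∧
      (∀ x ∈ e.tail, pvNorm (N + 1) x ≠ 0)) :
    ∀ w c, 0 ≤ w → w ≤ N → c ∈ pvChilds (pvBuildGraph N A) w →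
      -(N + 1) ≤ c ∧ c ≤ N ∧ pvNorm (N + 1) c ≠ 0 := by
  intro w c hw0 hwN hc
  rw [pvBuild_childs N A hN hA w hw0 hwN] at hc
  rcases List.mem_append.1 hc with h | h
  · rcases Decidable.em (w = 0) with hw | hw
    · rw [if_pos hw] at h
      rw [PySem.List.mem_pyRange_one] at h
      simp only [pvNorm]
      constructor; omega
      constructor; omega
      rw [if_neg (by omega)]; omega
    · rw [if_neg hw] at h; simp at h
  · rw [List.mem_filterMap] at h
    obtain ⟨e, he, hfe⟩ := h
    have hwfe := hA e he
    rcases e with _ | ⟨s, _ | ⟨t', _ | ⟨u, r⟩⟩⟩ <;> simp at hwfe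
    obtain ⟨⟨⟨hs1, hs2⟩, ht1, ht2⟩, hto⟩ := hwfe
    simp only [pvRawSel] at hfe
    split at hfe
    · have : c = t' := by exact (Option.some.inj hfe).symm
      subst this
      exact ⟨by omega, by omega, hto⟩
    · exact absurd hfe (by simp)

-- the normalized graph and its children ---------------------------------------

def pvGn (N : Int) (A : List (List Int)) : List (List Int) :=
  (pvBuildGraph N A).map (List.map (pvNorm (N + 1)))

lemma pvGn_childs_map (N : Int) (A : List (List Int)) (hN : 0 ≤ N)
    (w : Int) (hw0 : 0 ≤ w) (hwN : w ≤ N) :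
    pvChilds (pvGn N A) w = (pvChilds (pvBuildGraph N A) w).map (pvNorm (N + 1)) := by
  have hlen := pvBuild_length N A
  unfold pvGn pvChilds
  rw [pvGet_map, PySem.List.pyGet?_of_nonneg _ hw0,
    List.getElem?_eq_getElem (by rw [hlen]; omega)]
  simp

lemma pvGn_childs (N : Int) (A : List (List Int)) (hN : 0 ≤ N)
    (hA : ∀ e ∈ A, e.length = 2 ∧ (∀ x ∈ e, -(N + 1) ≤ x ∧ x ≤ N) ∧
      (∀ x ∈ e.tail, pvNorm (N + 1) x ≠ 0)) :
    ∀ w, 0 ≤ w → w ≤ N → pvChilds (pvGn N A) w =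
      (if w = 0 then PySem.List.pyRange 1 (N + 1) 1 else []) ++ pvEChilds N A w := by
  intro w hw0 hwN
  rw [pvGn_childs_map N A hN w hw0 hwN, pvBuild_childs N A hN hA w hw0 hwN,
    List.map_append]
  congr 1
  · split
    · rw [List.map_congr_left (fun x hx => ?_), List.map_id]
      rw [PySem.List.mem_pyRange_one] at hx
      simp only [pvNorm, id]
      rw [if_neg (by omega)]
    · rfl
  · rw [List.map_filterMap]
    unfold pvEChilds
    congr 1
    funext e
    rcases e with _ | ⟨s, _ | ⟨t', _ | ⟨u, r⟩⟩⟩ <;> simp [pvRawSel]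

-- normalized children are nodes in [1, N]
lemma pvGn_childs_range (N : Int) (A : List (List Int)) (hN : 0 ≤ N)
    (hA : ∀ e ∈ A, e.length = 2 ∧ (∀ x ∈ e, -(N + 1) ≤ x ∧ x ≤ N) ∧
      (∀ x ∈ e.tail, pvNorm (N + 1) x ≠ 0)) :
    ∀ w c, 0 ≤ w → w ≤ N → c ∈ pvChilds (pvGn N A) w → 1 ≤ c ∧ c ≤ N := by
  intro w c hw0 hwN hc
  rw [pvGn_childs_map N A hN w hw0 hwN] at hc
  rw [List.mem_map] at hc
  obtain ⟨c0, hc0, hcn⟩ := hc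
  have := pvRaw_childs_range N A hN hA w c0 hw0 hwN hc0
  subst hcn
  simp only [pvNorm] at *
  split_ifs <;> omega

-- closure along A's edges ------------------------------------------------------

def pvTgts (N : Int) (A : List (List Int)) : Finset ℤ :=
  (A.filterMap (fun e => match e with
    | [_, t] => some (pvNorm (N + 1) t)
    | _ => none)).toFinset

lemma pvEChilds_sub (N : Int) (A : List (List Int)) (v : Int) :
    (pvEChilds N A v).toFinset ⊆ pvTgts N A := by
  intro x hx
  unfold pvEChilds at hx
  unfold pvTgts
  rw [List.mem_toFinset, List.mem_filterMap] at hx ⊢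
  obtain ⟨e, he, hfe⟩ := hx
  refine ⟨e, he, ?_⟩
  rcases e with _ | ⟨s, _ | ⟨t', _ | ⟨u, r⟩⟩⟩
  · exact absurd hfe (by simp)
  · exact absurd hfe (by simp)
  · have hred : (if pvNorm (N + 1) s = v then some (pvNorm (N + 1) t') else none) = some x := hfe
    show some (pvNorm (N + 1) t') = some x
    by_cases hsv : pvNorm (N + 1) s = v
    · rw [if_pos hsv] at hred; exact hred
    · rw [if_neg hsv] at hred; exact absurd hred (by simp)
  · exact absurd hfe (by simp)

lemma pvTgts_sub_Icc (N : Int) (A : List (List Int)) (_hN : 0 ≤ N)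
    (hA : ∀ e ∈ A, e.length = 2 ∧ (∀ x ∈ e, -(N + 1) ≤ x ∧ x ≤ N) ∧
      (∀ x ∈ e.tail, pvNorm (N + 1) x ≠ 0)) :
    pvTgts N A ⊆ Finset.Icc 1 N := by
  intro x hx
  unfold pvTgts at hx
  rw [List.mem_toFinset, List.mem_filterMap] at hx
  obtain ⟨e, he, hfe⟩ := hx
  have hwfe := hA e he
  rw [Finset.mem_Icc]
  rcases e with _ | ⟨s, _ | ⟨t', _ | ⟨u, r⟩⟩⟩
  · exact absurd hfe (by simp)
  · exact absurd hfe (by simp)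
  · obtain ⟨hl, hb, hto⟩ := hwfe
    have ht := hb t' (by simp)
    have hto' := hto t' (by simp)
    have hx : pvNorm (N + 1) t' = x := by simpa using hfe
    rw [← hx]
    simp only [pvNorm] at hto' ⊢
    split_ifs at hto' ⊢ <;> omega
  · exact absurd hfe (by simp)

lemma pvTgts_card_le (N : Int) (A : List (List Int)) : (pvTgts N A).card ≤ A.length :=
  le_trans (List.toFinset_card_le _) (List.length_filterMap_le _ _)

lemma pvENxt_mono (N : Int) (A : List (List Int)) {S T : Finset ℤ} (h : S ⊆ T) :
    pvENxt N A S ⊆ pvENxt N A T :=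
  Finset.union_subset_union h (Finset.biUnion_subset_biUnion_of_subset_left _ h)

lemma pvSubset_eNxt (N : Int) (A : List (List Int)) (S : Finset ℤ) : S ⊆ pvENxt N A S :=
  Finset.subset_union_left

lemma pvENxt_box (N : Int) (A : List (List Int)) {S : Finset ℤ}
    (hS : S ⊆ pvTgts N A) : pvENxt N A S ⊆ pvTgts N A := by
  apply Finset.union_subset hS
  apply Finset.biUnion_subset.2
  intro v _
  exact pvEChilds_sub N A v

lemma pvEIter_box (N : Int) (A : List (List Int)) {S : Finset ℤ}
    (hS : S ⊆ pvTgts N A) (k : Nat) : (pvENxt N A)^[k] S ⊆ pvTgts N A := by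
  induction k with
  | zero => exact hS
  | succ k ih => rw [Function.iterate_succ_apply']; exact pvENxt_box N A ih

lemma pvEIter_mono (N : Int) (A : List (List Int)) {S T : Finset ℤ} (h : S ⊆ T) (k : Nat) :
    (pvENxt N A)^[k] S ⊆ (pvENxt N A)^[k] T := by
  induction k with
  | zero => exact h
  | succ k ih => rw [Function.iterate_succ_apply', Function.iterate_succ_apply']
                 exact pvENxt_mono N A ih

lemma pvSubset_eIter (N : Int) (A : List (List Int)) (S : Finset ℤ) (k : Nat) :
    S ⊆ (pvENxt N A)^[k] S := by
  induction k with
  | zero => exact subset_rfl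
  | succ k ih => rw [Function.iterate_succ_apply']
                 exact subset_trans ih (pvSubset_eNxt N A _)

lemma pvEStabilize (N : Int) (A : List (List Int)) {S : Finset ℤ}
    (hS : S ⊆ pvTgts N A) :
    pvENxt N A ((pvENxt N A)^[A.length + 1] S) = (pvENxt N A)^[A.length + 1] S := by
  set K := A.length + 1 with hK
  by_contra hne
  have hfix : ∀ j k : Nat, pvENxt N A ((pvENxt N A)^[j] S) = (pvENxt N A)^[j] S →
      (pvENxt N A)^[j + k] S = (pvENxt N A)^[j] S := by
    intro j k h
    rw [Nat.add_comm, Function.iterate_add_apply]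
    exact Function.iterate_fixed h k
  have hstrict : ∀ j : Nat, j ≤ K → pvENxt N A ((pvENxt N A)^[j] S) ≠ (pvENxt N A)^[j] S := by
    intro j hj h
    apply hne
    have h1 := hfix j (K - j) h
    rw [Nat.add_sub_cancel' hj] at h1
    rw [h1]; exact h
  have hcard : ∀ j : Nat, j ≤ K + 1 → j ≤ ((pvENxt N A)^[j] S).card := by
    intro j
    induction j with
    | zero => intro _; omega
    | succ j ih =>
      intro hj
      have h1 : (pvENxt N A)^[j] S ⊂ (pvENxt N A)^[j + 1] S := by
        rw [Function.iterate_succ_apply']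
        exact ssubset_of_subset_of_ne (pvSubset_eNxt N A _)
          (fun h => hstrict j (by omega) h.symm)
      have := Finset.card_lt_card h1
      have := ih (by omega)
      omega
  have h1 := hcard (K + 1) le_rfl
  have h2 : ((pvENxt N A)^[K + 1] S).card ≤ (pvTgts N A).card :=
    Finset.card_le_card (pvEIter_box N A hS (K + 1))
  have h3 := pvTgts_card_le N A
  omega

lemma pvEReach_box (N : Int) (A : List (List Int)) (v : Int) :
    pvEReach N A v ⊆ pvTgts N A :=
  pvEIter_box N A (pvEChilds_sub N A v) _

lemma pvEReach_fix (N : Int) (A : List (List Int)) (v : Int) :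
    pvENxt N A (pvEReach N A v) = pvEReach N A v :=
  pvEStabilize N A (pvEChilds_sub N A v)

lemma pvEChilds_subset_reach (N : Int) (A : List (List Int)) (v : Int) :
    (pvEChilds N A v).toFinset ⊆ pvEReach N A v :=
  pvSubset_eIter N A _ _

lemma pvEReach_child (N : Int) (A : List (List Int)) {v c : Int}
    (hc : c ∈ pvEChilds N A v) : pvEReach N A c ⊆ pvEReach N A v := by
  have hcv : c ∈ pvEReach N A v :=
    pvEChilds_subset_reach N A v (List.mem_toFinset.2 hc)
  have h1 : (pvEChilds N A c).toFinset ⊆ pvEReach N A v := by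
    intro x hx
    rw [← pvEReach_fix N A v]
    apply Finset.subset_union_right
    exact Finset.mem_biUnion.2 ⟨c, hcv, hx⟩
  calc pvEReach N A c = (pvENxt N A)^[A.length + 1] (pvEChilds N A c).toFinset := rfl
    _ ⊆ (pvENxt N A)^[A.length + 1] (pvEReach N A v) := pvEIter_mono N A h1 _
    _ = pvEReach N A v := Function.iterate_fixed (pvEReach_fix N A v) _

-- the termination measure ------------------------------------------------------

def pvMu (N : Int) (A : List (List Int)) (v : Int) : Nat :=
  if v = 0 then (pvTgts N A).card + 1 else (pvEReach N A v).card

-- Pre_'s acyclicity gives: no target node reaches itself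
lemma pvAcyc_tgts (N : Int) (A : List (List Int)) (hN : 0 ≤ N)
    (hA : ∀ e ∈ A, e.length = 2 ∧ (∀ x ∈ e, -(N + 1) ≤ x ∧ x ≤ N) ∧
      (∀ x ∈ e.tail, pvNorm (N + 1) x ≠ 0))
    (hacyc : ∀ v ∈ A.flatten, 1 ≤ pvNorm (N + 1) v →
      pvNorm (N + 1) v ∉ pvEReach N A (pvNorm (N + 1) v)) :
    ∀ w ∈ pvTgts N A, w ∉ pvEReach N A w := by
  intro w hw
  have hw1 : 1 ≤ w := (Finset.mem_Icc.1 (pvTgts_sub_Icc N A hN hA hw)).1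
  unfold pvTgts at hw
  rw [List.mem_toFinset, List.mem_filterMap] at hw
  obtain ⟨e, he, hfe⟩ := hw
  rcases e with _ | ⟨s, _ | ⟨t', _ | ⟨u, r⟩⟩⟩
  · exact absurd hfe (by simp)
  · exact absurd hfe (by simp)
  · have hw' : pvNorm (N + 1) t' = w := by simpa using hfe
    have ht : t' ∈ A.flatten := List.mem_flatten.2 ⟨[s, t'], he, by simp⟩
    rw [← hw']
    exact hacyc t' ht (by omega)
  · exact absurd hfe (by simp)

lemma pvMu_child (N : Int) (A : List (List Int)) (hN : 0 ≤ N)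
    (hA : ∀ e ∈ A, e.length = 2 ∧ (∀ x ∈ e, -(N + 1) ≤ x ∧ x ≤ N) ∧
      (∀ x ∈ e.tail, pvNorm (N + 1) x ≠ 0))
    (hacyc : ∀ v ∈ A.flatten, 1 ≤ pvNorm (N + 1) v →
      pvNorm (N + 1) v ∉ pvEReach N A (pvNorm (N + 1) v)) :
    ∀ w c, 0 ≤ w → w ≤ N → c ∈ pvChilds (pvGn N A) w → pvMu N A c < pvMu N A w := by
  intro w c hw0 hwN hc
  have hcr := pvGn_childs_range N A hN hA w c hw0 hwN hc
  have hc0 : c ≠ 0 := by omega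
  rw [pvGn_childs N A hN hA w hw0 hwN] at hc
  by_cases hw : w = 0
  · -- μ 0 strictly dominates every closure cardinality
    have hcT : (pvEReach N A c).card ≤ (pvTgts N A).card :=
      Finset.card_le_card (pvEReach_box N A c)
    simp only [pvMu, if_pos hw, if_neg hc0]
    omega
  · rw [if_neg hw] at hc
    simp only [List.nil_append] at hc
    have hcT : c ∈ pvTgts N A := pvEChilds_sub N A w (List.mem_toFinset.2 hc)
    have hss : pvEReach N A c ⊂ pvEReach N A w := by
      refine ⟨pvEReach_child N A hc, fun h => ?_⟩
      exact pvAcyc_tgts N A hN hA hacyc c hcT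
        (h (pvEChilds_subset_reach N A w (List.mem_toFinset.2 hc)))
    simp only [pvMu, if_neg hw, if_neg hc0]
    exact Finset.card_lt_card hss

lemma pvMu_lt_fuel (N : Int) (A : List (List Int)) (hN : 0 ≤ N)
    (hA : ∀ e ∈ A, e.length = 2 ∧ (∀ x ∈ e, -(N + 1) ≤ x ∧ x ≤ N) ∧
      (∀ x ∈ e.tail, pvNorm (N + 1) x ≠ 0)) :
    ∀ w, pvMu N A w < (N + 1).toNat + 1 := by
  intro w
  have h1 : (pvTgts N A).card ≤ N.toNat := by
    have := Finset.card_le_card (pvTgts_sub_Icc N A hN hA)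
    rwa [Int.card_Icc, show N + 1 - 1 = N by ring] at this
  have h2 : (pvEReach N A w).card ≤ (pvTgts N A).card :=
    Finset.card_le_card (pvEReach_box N A w)
  unfold pvMu
  split <;> omega

-- stabilization of the synchronous height on the normalized graph -------------

lemma pvH_stab (N : Int) (A : List (List Int)) (hN : 0 ≤ N)
    (hA : ∀ e ∈ A, e.length = 2 ∧ (∀ x ∈ e, -(N + 1) ≤ x ∧ x ≤ N) ∧
      (∀ x ∈ e.tail, pvNorm (N + 1) x ≠ 0))
    (hacyc : ∀ v ∈ A.flatten, 1 ≤ pvNorm (N + 1) v →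
      pvNorm (N + 1) v ∉ pvEReach N A (pvNorm (N + 1) v)) :
    ∀ (μv : Nat) (w : Int), 0 ≤ w → w ≤ N → pvMu N A w = μv →
    ∀ f f' : Nat, μv < f → μv < f' → pvH (pvGn N A) f w = pvH (pvGn N A) f' w := by
  intro μv
  induction μv using Nat.strong_induction_on with
  | _ μv ih =>
    intro w hw0 hwN hμ f f' hf hf'
    cases f with
    | zero => omega
    | succ f =>
      cases f' with
      | zero => omega
      | succ f' =>
        simp only [pvH]
        split
        · rfl
        · apply PySem.List.foldl_congr_mem
          intro a c hc
          have hcr := pvGn_childs_range N A hN hA w c hw0 hwN hc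
          have hmc := pvMu_child N A hN hA hacyc w c hw0 hwN hc
          rw [hμ] at hmc
          rw [ih (pvMu N A c) hmc c (by omega) (by omega) rfl f f' (by omega) (by omega)]

lemma pvHt_fix (N : Int) (A : List (List Int)) (hN : 0 ≤ N)
    (hA : ∀ e ∈ A, e.length = 2 ∧ (∀ x ∈ e, -(N + 1) ≤ x ∧ x ≤ N) ∧
      (∀ x ∈ e.tail, pvNorm (N + 1) x ≠ 0))
    (hacyc : ∀ v ∈ A.flatten, 1 ≤ pvNorm (N + 1) v →
      pvNorm (N + 1) v ∉ pvEReach N A (pvNorm (N + 1) v)) :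
    ∀ w, 0 ≤ w → w ≤ N → pvHt (pvGn N A) N w =
      if (pvChilds (pvGn N A) w).isEmpty then 1
      else (pvChilds (pvGn N A) w).foldl (fun a c => max a (pvHt (pvGn N A) N c + 1)) 0 := by
  intro w hw0 hwN
  have h1 : pvHt (pvGn N A) N w = pvH (pvGn N A) ((N + 1).toNat + 2) w := by
    apply pvH_stab N A hN hA hacyc (pvMu N A w) w hw0 hwN rfl
    · have := pvMu_lt_fuel N A hN hA w; omega
    · have := pvMu_lt_fuel N A hN hA w; omega
  rw [h1]
  simp only [pvH, pvHt]

-- correctness of A's memoized DFS ---------------------------------------------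

-- the memo-list invariant of A's DFS
def pvInv (N : Int) (A : List (List Int)) (m : List Int) : Prop :=
  m.length = (N + 1).toNat ∧
  ∀ j : Nat, ∀ x : Int, m[j]? = some x → x = -1 ∨ x = pvHt (pvGn N A) N (j : Int)

lemma pvNorm_range (N : Int) (v : Int) (_hN : 0 ≤ N) (h1 : -(N + 1) ≤ v) (h2 : v ≤ N) :
    0 ≤ pvNorm (N + 1) v ∧ pvNorm (N + 1) v ≤ N := by
  simp only [pvNorm]; split_ifs <;> omega

lemma pvBfs_correct (N : Int) (A : List (List Int)) (hN : 0 ≤ N)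
    (hA : ∀ e ∈ A, e.length = 2 ∧ (∀ x ∈ e, -(N + 1) ≤ x ∧ x ≤ N) ∧
      (∀ x ∈ e.tail, pvNorm (N + 1) x ≠ 0))
    (hacyc : ∀ v ∈ A.flatten, 1 ≤ pvNorm (N + 1) v →
      pvNorm (N + 1) v ∉ pvEReach N A (pvNorm (N + 1) v)) :
    ∀ (f : Nat) (v : Int) (m : List Int), -(N + 1) ≤ v → v ≤ N →
      pvMu N A (pvNorm (N + 1) v) < f → pvInv N A m →
      (pvBfs (pvBuildGraph N A) f v m).1 = pvHt (pvGn N A) N (pvNorm (N + 1) v) ∧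
      pvInv N A (pvBfs (pvBuildGraph N A) f v m).2 := by
  intro f
  induction f with
  | zero => intro v m _ _ h _; omega
  | succ f ih =>
    intro v m hv1 hv2 hμ hm
    set g := pvBuildGraph N A with hgdef
    set w := pvNorm (N + 1) v with hwdef
    have hw : 0 ≤ w ∧ w ≤ N := pvNorm_range N v hN hv1 hv2
    have hwn : w.toNat < (N + 1).toNat := by omega
    have hmlen : (m.length : Int) = N + 1 := by rw [hm.1]; omega
    have hmv : PySem.List.pyGet? m v = some (m[w.toNat]'(by rw [hm.1]; exact hwn)) := by
      rw [pvGet_norm m v (by omega) (by omega), hmlen, ← hwdef,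
        List.getElem?_eq_getElem (by rw [hm.1]; exact hwn)]
    have hcs : pvChilds g v = pvChilds g w :=
      pvChilds_norm g N (pvBuild_length N A) hN v (by omega) (by omega)
    have hgn : pvChilds (pvGn N A) w = (pvChilds g w).map (pvNorm (N + 1)) :=
      pvGn_childs_map N A hN w hw.1 hw.2
    have hfix := pvHt_fix N A hN hA hacyc w hw.1 hw.2
    simp only [pvBfs]
    rw [hcs]
    split
    · -- no children
      rename_i hlen
      have hemp : (pvChilds (pvGn N A) w).isEmpty := by
        rw [hgn]
        simpa [List.isEmpty_iff, List.length_eq_zero_iff] using hlen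
      constructor
      · rw [hfix, if_pos hemp]
      · exact hm
    · rename_i hlen
      rw [hmv]
      split
      · -- memo hit
        rename_i hmemo
        simp only [Option.getD_some] at hmemo ⊢
        rcases hm.2 w.toNat _ (List.getElem?_eq_getElem _) with h | h
        · exact absurd h hmemo
        · rw [Int.toNat_of_nonneg hw.1] at h
          exact ⟨h, hm⟩
      · -- recurse over the children, threading the memo list
        have hsub : ∀ c ∈ pvChilds g w, -(N + 1) ≤ c ∧ c ≤ N ∧
            pvMu N A (pvNorm (N + 1) c) < f := by
          intro c hc
          have hr := pvRaw_childs_range N A hN hA w c hw.1 hw.2 hc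
          have hcg : pvNorm (N + 1) c ∈ pvChilds (pvGn N A) w := by
            rw [hgn]; exact List.mem_map_of_mem hc
          have := pvMu_child N A hN hA hacyc w _ hw.1 hw.2 hcg
          exact ⟨hr.1, hr.2.1, by omega⟩
        have haux : ∀ (cs : List Int), (∀ c ∈ cs, c ∈ pvChilds g w) →
            ∀ (a : Int) (m' : List Int), pvInv N A m' →
            (cs.foldl (fun (acc : Int × List Int) c =>
                (max acc.1 ((pvBfs g f c acc.2).1 + 1), (pvBfs g f c acc.2).2)) (a, m')).1
              = cs.foldl (fun a c => max a (pvHt (pvGn N A) N (pvNorm (N + 1) c) + 1)) a ∧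
            pvInv N A (cs.foldl (fun (acc : Int × List Int) c =>
                (max acc.1 ((pvBfs g f c acc.2).1 + 1), (pvBfs g f c acc.2).2)) (a, m')).2 := by
          intro cs
          induction cs with
          | nil => intro _ a m' hm'; exact ⟨rfl, hm'⟩
          | cons c t iht =>
            intro hmem a m' hm'
            have hc := hsub c (hmem c List.mem_cons_self)
            have hrec := ih c m' hc.1 hc.2.1 hc.2.2 hm'
            simp only [List.foldl_cons]
            rw [hrec.1]
            exact iht (fun c' hc' => hmem c' (List.mem_cons_of_mem _ hc')) _ _ hrec.2
        have hres := haux (pvChilds g w) (fun _ h => h) 0 m hm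
        have hval : (((pvChilds g w).foldl (fun (acc : Int × List Int) c =>
            (max acc.1 ((pvBfs g f c acc.2).1 + 1), (pvBfs g f c acc.2).2)) (0, m))).1
            = pvHt (pvGn N A) N w := by
          rw [hres.1, hfix,
            if_neg (by rw [hgn]; simpa [List.isEmpty_iff, List.length_eq_zero_iff] using hlen),
            hgn, List.foldl_map]
        refine ⟨hval, ?_⟩
        have hset : PySem.List.pySetD
            ((pvChilds g w).foldl (fun (acc : Int × List Int) c =>
              (max acc.1 ((pvBfs g f c acc.2).1 + 1), (pvBfs g f c acc.2).2)) (0, m)).2 v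
            (((pvChilds g w).foldl (fun (acc : Int × List Int) c =>
              (max acc.1 ((pvBfs g f c acc.2).1 + 1), (pvBfs g f c acc.2).2)) (0, m)).1) =
            (((pvChilds g w).foldl (fun (acc : Int × List Int) c =>
              (max acc.1 ((pvBfs g f c acc.2).1 + 1), (pvBfs g f c acc.2).2)) (0, m)).2).set
            w.toNat
            (((pvChilds g w).foldl (fun (acc : Int × List Int) c =>
              (max acc.1 ((pvBfs g f c acc.2).1 + 1), (pvBfs g f c acc.2).2)) (0, m)).1) := by
          have hl2 : ((((pvChilds g w).foldl (fun (acc : Int × List Int) c =>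
              (max acc.1 ((pvBfs g f c acc.2).1 + 1), (pvBfs g f c acc.2).2)) (0, m)).2).length
              : Int) = N + 1 := by rw [hres.2.1]; omega
          rw [pvSetD_norm _ _ _ (by rw [hl2]; omega) (by rw [hl2]; omega), hl2, ← hwdef]
        rw [hset]
        constructor
        · rw [List.length_set]; exact hres.2.1
        · intro j x hx
          by_cases hj : j = w.toNat
          · subst hj
            rw [List.getElem?_set_self (by rw [hres.2.1]; exact hwn)] at hx
            right
            have hx' := Option.some.inj hx
            rw [Int.toNat_of_nonneg hw.1, ← hx']
            exact hval
          · rw [List.getElem?_set_ne (fun h => hj h.symm)] at hx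
            exact hres.2.2 j x hx

-- correctness of B's fixpoint iteration ---------------------------------------

lemma pvFold_shift (f : Int → Int) : ∀ (t : List Int) (b : Int),
    t.foldl (fun a c => max a (f c + 1)) (b + 1) = t.foldl (fun a c => max a (f c)) b + 1 := by
  intro t
  induction t with
  | nil => intro b; rfl
  | cons c t ih =>
    intro b
    simp only [List.foldl_cons]
    rw [max_add_add_right]
    exact ih (max b (f c))

lemma pvFold_max_plus (l : List Int) (f : Int → Int) (hl : l ≠ [])
    (h0 : ∀ c ∈ l, 0 ≤ f c) :
    l.foldl (fun a c => max a (f c + 1)) 0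
      = 1 + (PySem.List.max? (l.map f) (fun y => y)).getD 0 := by
  rcases l with _ | ⟨h, t⟩
  · exact absurd rfl hl
  simp only [List.map_cons, PySem.List.max?_id_cons, Option.getD_some, List.foldl_cons]
  have h1 : max 0 (f h + 1) = f h + 1 := by
    have := h0 h List.mem_cons_self; omega
  rw [h1, pvFold_shift f t (f h), List.foldl_map]
  omega

lemma pvIter_eq (g : List (List Int)) (N : Int) :
    ∀ (k : Nat) (dp : List Int), pvIter g N k dp = (pvStep g N)^[k] dp := by
  intro k
  induction k with
  | zero => intro dp; rfl
  | succ k ih =>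
    intro dp
    simp only [pvIter]
    split
    · rename_i h; exact (Function.iterate_fixed h (k + 1)).symm
    · rw [ih (pvStep g N dp), ← Function.iterate_succ_apply]

lemma pvSync_get (N : Int) (A : List (List Int)) (hN : 0 ≤ N)
    (hA : ∀ e ∈ A, e.length = 2 ∧ (∀ x ∈ e, -(N + 1) ≤ x ∧ x ≤ N) ∧
      (∀ x ∈ e.tail, pvNorm (N + 1) x ≠ 0)) :
    ∀ (k : Nat) (v : Int), -(N + 1) ≤ v → v ≤ N →
    PySem.List.pyGet? ((pvStep (pvBuildGraph N A) N)^[k] (List.replicate (N + 1).toNat (0 : Int))) v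
      = some (pvH (pvGn N A) k (pvNorm (N + 1) v)) := by
  intro k
  induction k with
  | zero =>
    intro v hv1 hv2
    have hw := pvNorm_range N v hN hv1 hv2
    rw [Function.iterate_zero_apply]
    rw [pvGet_norm _ v (by simp; omega) (by simp; omega)]
    rw [show ((List.replicate (N + 1).toNat (0 : Int)).length : Int) = N + 1 by simp; omega]
    rw [List.getElem?_replicate, if_pos (by omega)]
    simp [pvH]
  | succ k ih =>
    intro v hv1 hv2
    have hw := pvNorm_range N v hN hv1 hv2
    set w := pvNorm (N + 1) v with hwdef
    rw [Function.iterate_succ_apply']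
    simp only [pvStep]
    have hlen : (((PySem.List.pyRange 0 (N + 1) 1).map (fun v =>
        let cs := pvChilds (pvBuildGraph N A) v
        if cs.isEmpty then (1 : Int)
        else 1 + (PySem.List.max? (cs.map (fun c =>
          (PySem.List.pyGet? ((pvStep (pvBuildGraph N A) N)^[k]
            (List.replicate (N + 1).toNat (0 : Int))) c).getD 0)) (fun y => y)).getD 0)).length
        : Int) = N + 1 := by
      rw [List.length_map, PySem.List.length_pyRange_one]; omega
    rw [pvGet_norm _ v (by rw [hlen]; omega) (by rw [hlen]; omega), hlen, ← hwdef,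
      List.getElem?_map, PySem.List.getElem?_pyRange_one,
      if_pos (by omega : w.toNat < ((N : Int) + 1 - 0).toNat)]
    simp only [Option.map_some]
    rw [show (0 : Int) + (w.toNat : Int) = w by omega]
    simp only [pvH]
    have hcs : pvChilds (pvGn N A) w = (pvChilds (pvBuildGraph N A) w).map (pvNorm (N + 1)) :=
      pvGn_childs_map N A hN w hw.1 hw.2
    by_cases hemp : (pvChilds (pvBuildGraph N A) w).isEmpty
    · have : (pvChilds (pvGn N A) w).isEmpty := by
        rw [hcs]; simpa [List.isEmpty_iff] using hemp
      simp [hemp, this]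
    · have hemp' : ¬ (pvChilds (pvGn N A) w).isEmpty := by
        rw [hcs]; simpa [List.isEmpty_iff] using hemp
      rw [if_neg hemp, if_neg hemp']
      have hmap : (pvChilds (pvBuildGraph N A) w).map (fun c =>
            (PySem.List.pyGet? ((pvStep (pvBuildGraph N A) N)^[k]
              (List.replicate (N + 1).toNat (0 : Int))) c).getD 0)
          = (pvChilds (pvGn N A) w).map (fun c => pvH (pvGn N A) k c) := by
        rw [hcs, List.map_map]
        apply List.map_congr_left
        intro c hc
        have hr := pvRaw_childs_range N A hN hA w c hw.1 hw.2 hc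
        rw [Function.comp_apply, ih c hr.1 hr.2.1]
        rfl
      rw [hmap, ← pvFold_max_plus (pvChilds (pvGn N A) w) (fun c => pvH (pvGn N A) k c)
        (by simpa [List.isEmpty_iff] using hemp') (fun c _ => pvH_nonneg (pvGn N A) k c)]

-- ===== VERDICT (by name: the statement is the Claim_ definition above) =====
theorem calc_py_spec : Claim_equal_calc_py := by
  intro N A _ hPre
  obtain ⟨hN, hA, hacyc⟩ := hPre
  unfold Spec_calc_py
  have hInv : pvInv N A (List.replicate (N + 1).toNat (-1 : Int)) := by
    refine ⟨by simp, ?_⟩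
    intro j x hx
    rw [List.getElem?_replicate] at hx
    split at hx
    · left; exact (Option.some.inj hx).symm
    · exact absurd hx (by simp)
  have hlen : (pvBuildGraph N A).length = (N + 1).toNat := pvBuild_length N A
  have hμ : pvMu N A (pvNorm (N + 1) 0) < (pvBuildGraph N A).length + 1 := by
    have := pvMu_lt_fuel N A hN hA (pvNorm (N + 1) 0)
    omega
  have hA1 := pvBfs_correct N A hN hA hacyc ((pvBuildGraph N A).length + 1) 0
    (List.replicate (N + 1).toNat (-1)) (by omega) hN hμ hInv
  have hnorm0 : pvNorm (N + 1) 0 = 0 := by simp [pvNorm]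
  simp only [calc_py, calc_py_alt]
  rw [hA1.1, hnorm0, pvIter_eq,
    pvSync_get N A hN hA ((N + 2).toNat) 0 (by omega) hN, hnorm0]
  simp only [Option.getD_some]
  rw [show (N + 2).toNat = (N + 1).toNat + 1 by omega]
  rfl
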